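-- pv_equiv track=rewrite | github.com/david-man/avge-card-game-platform-dev | card_game/scanner_game.py | _parse_ordering
-- ===== SOURCE A (Python) =====
-- from typing import Any, Callable
--
-- def _parse_ordering(raw: str, unordered_groups: list[Any]) -> list[Any] | None:
--     """
--     Accepts either:
--       - "order 2,0,1"
--       - "2,0,1"
--       - "2 0 1"
--     Returns reordered listeners list or None if invalid.
--     """
--     if(raw is None):
--         return None
--     cleaned = raw.strip().lower()
--     if(cleaned.startswith("order")):
--         cleaned = raw.strip()[5:].strip()
--     if(cleaned == ""):
--         return None
--
--     for sep in [",", " "]: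
--         if(sep in cleaned):
--             parts = [p for p in cleaned.replace(",", " ").split(" ") if p != ""]
--             break
--     else:
--         parts = [cleaned]
--
--     try:
--         indices = [int(p) for p in parts]
--     except ValueError:
--         return None
--
--     if(len(indices) != len(unordered_groups)):
--         return None
--     if(sorted(indices) != list(range(len(unordered_groups)))):
--         return None
--
--     return [unordered_groups[i] for i in indices]
-- ===== SOURCE B (Python) =====
-- def _parse_ordering(raw, unordered_groups):
--     if raw is None:
--         return None
--     s = raw.strip()
--     cleaned = s[5:].strip() if s.lower().startswith("order") else s.lower()
--     if cleaned == "":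
--         return None
--
--     # Unconditional tokenization: turning commas into spaces and splitting on
--     # spaces yields exactly one token [cleaned] when neither separator occurs,
--     # so A's separator-selection for/else loop is unnecessary.
--     parts = [p for p in cleaned.replace(",", " ").split(" ") if p != ""]
--
--     n = len(unordered_groups)
--     if len(parts) != n:
--         return None
--
--     # Fused pass: parse each token, validate bounds/duplicates with a seen
--     # array, and build the reordered output as we go (no sort, no index list).
--     seen = [False] * n
--     result = []
--     for p in parts:
--         try:
--             i = int(p)
--         except ValueError:
--             return None
--         if i < 0 or i >= n or seen[i]:
--             return None
--         seen[i] = True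
--         result.append(unordered_groups[i])
--     return result
-- ===== Notes on version B (the rewrite author's own statement) =====
-- stated objective: simpler
-- what changed: B drops A's separator-selection for/else loop (replace-commas-then-split already yields the single token when no separator occurs) and fuses A's three staged passes (parse all ints, length check plus sorted(indices)==range(n) validation, then rebuild) into one linear scan that parses, checks bounds/duplicates with a boolean seen array, and appends the reordered element immediately.
import Mathlib
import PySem

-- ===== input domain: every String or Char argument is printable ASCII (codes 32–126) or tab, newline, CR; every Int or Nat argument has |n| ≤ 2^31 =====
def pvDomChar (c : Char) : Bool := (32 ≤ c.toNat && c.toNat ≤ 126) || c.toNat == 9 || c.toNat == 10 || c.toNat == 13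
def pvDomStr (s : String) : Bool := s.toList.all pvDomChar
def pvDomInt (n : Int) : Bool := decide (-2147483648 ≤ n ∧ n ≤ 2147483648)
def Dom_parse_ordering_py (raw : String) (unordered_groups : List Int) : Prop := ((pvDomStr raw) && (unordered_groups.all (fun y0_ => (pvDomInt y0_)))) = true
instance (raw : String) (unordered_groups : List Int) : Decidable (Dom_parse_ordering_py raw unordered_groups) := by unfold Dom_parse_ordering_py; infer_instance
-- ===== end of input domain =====

-- B drops A's separator-selection for/else loop (replace+split already yields the single
-- token when no separator occurs) and fuses A's staged parse / sort-against-range validate /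
-- rebuild passes into one seen-array scan; objective: simpler.


-- ===== PORT A =====
-- 'indices = [int(p) for p in parts]' with try/except ValueError → None
def pvParseInts : List (List Char) → Option (List Int)
  | [] => some []
  | p :: ps =>
    match PySem.Int.ofChars? p, pvParseInts ps with
    | some i, some rest => some (i :: rest)
    | _, _ => none

-- A's code from 'if cleaned == ""' onwards, given the computed 'cleaned'
def pvOrderA (cleaned : List Char) (groups : List Int) : Option (List Int) :=
  if cleaned = [] then none
  else
    let parts :=
      if PySem.Chars.isIn [','] cleaned then
        (PySem.Chars.splitOn (PySem.Chars.replace cleaned [','] [' ']) [' ']).filter (fun p => !p.isEmpty)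
      else if PySem.Chars.isIn [' '] cleaned then
        (PySem.Chars.splitOn (PySem.Chars.replace cleaned [','] [' ']) [' ']).filter (fun p => !p.isEmpty)
      else [cleaned]
    match pvParseInts parts with
    | none => none
    | some indices =>
      if (indices.length : Int) ≠ (groups.length : Int) then none
      else if PySem.List.sorted indices id ≠ PySem.List.pyRange 0 (groups.length : Int) 1 then none
      else some (indices.map (fun i => PySem.List.pyGetD groups i 0))

def parse_ordering_py (raw : String) (unordered_groups : List Int) : Option (List Int) :=
  let stripped := PySem.Chars.strip raw.toList
  let lowered := PySem.Chars.lower stripped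
  let cleaned :=
    if PySem.Chars.startswith lowered ("order".toList) then
      PySem.Chars.strip (PySem.List.slice stripped (some 5) none)
    else lowered
  pvOrderA cleaned unordered_groups

-- ===== PORT B =====
-- B's fused loop: parse each token, check bounds and the seen array, append the element
def pvScanLoop (groups : List Int) (n : Int) : List (List Char) → List Bool → List Int → Option (List Int)
  | [], _, result => some result
  | p :: ps, seen, result =>
    match PySem.Int.ofChars? p with
    | none => none
    | some i =>
      if i < 0 ∨ n ≤ i ∨ PySem.List.pyGetD seen i false = true then none
      else pvScanLoop groups n ps (PySem.List.pySetD seen i true) (result ++ [PySem.List.pyGetD groups i 0])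

def parse_ordering_py_alt (raw : String) (unordered_groups : List Int) : Option (List Int) :=
  let s := PySem.Chars.strip raw.toList
  let cleaned :=
    if PySem.Chars.startswith (PySem.Chars.lower s) ("order".toList) then
      PySem.Chars.strip (PySem.List.slice s (some 5) none)
    else PySem.Chars.lower s
  if cleaned = [] then none
  else
    let parts := (PySem.Chars.splitOn (PySem.Chars.replace cleaned [','] [' ']) [' ']).filter (fun p => !p.isEmpty)
    if (parts.length : Int) ≠ (unordered_groups.length : Int) then none
    else pvScanLoop unordered_groups (unordered_groups.length : Int) parts (List.replicate unordered_groups.length false) []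

-- ===== PRECONDITION & SPEC =====
def Spec_parse_ordering_py (raw : String) (unordered_groups : List Int) (out : Option (List Int)) : Prop := out = parse_ordering_py_alt raw unordered_groups
instance (raw : String) (unordered_groups : List Int) (out : Option (List Int)) : Decidable (Spec_parse_ordering_py raw unordered_groups out) := by unfold Spec_parse_ordering_py; infer_instance

-- ===== CLAIM (what is proved, stated in full; the proofs are below) =====
def Claim_equal_parse_ordering_py : Prop := ∀ (raw : String) (unordered_groups : List Int), Dom_parse_ordering_py raw unordered_groups → Spec_parse_ordering_py raw unordered_groups (parse_ordering_py raw unordered_groups)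

-- ===== LEMMAS AND PROOFS =====

-- proof-only characterisation of B's seen-array check
def pvOk (n : Int) : List Int → List Bool → Bool
  | [], _ => true
  | i :: rest, seen =>
    decide (0 ≤ i) && decide (i < n) && !(PySem.List.pyGetD seen i false) &&
      pvOk n rest (PySem.List.pySetD seen i true)

theorem pvReplace_go_not_mem (c : Char) (new : List Char) (l : List Char) :
    ∀ (fuel : Nat) (acc : List Char), c ∉ l →
      PySem.Chars.replace.go [c] new fuel l acc = acc.reverse ++ l := by
  induction l with
  | nil => intro fuel acc _; cases fuel <;> simp [PySem.Chars.replace.go]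
  | cons x t ih =>
    intro fuel acc h
    cases fuel with
    | zero => simp [PySem.Chars.replace.go]
    | succ fuel =>
      have hx : c ≠ x := fun e => h (e ▸ List.mem_cons_self)
      have ht : c ∉ t := fun e => h (List.mem_cons_of_mem _ e)
      simp only [PySem.Chars.replace.go]
      rw [if_neg (by simp [List.isPrefixOf, hx])]
      rw [ih fuel (x :: acc) ht]
      simp

theorem pvReplace_not_mem (c : Char) (new : List Char) (l : List Char) (h : c ∉ l) :
    PySem.Chars.replace l [c] new = l := by
  simp only [PySem.Chars.replace, List.isEmpty_cons]
  rw [pvReplace_go_not_mem c new l l.length [] h]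
  simp

theorem pvSplitOn_go_not_mem (c : Char) (l : List Char) :
    ∀ (fuel : Nat) (cur : List Char) (acc : List (List Char)), c ∉ l →
      PySem.Chars.splitOn.go [c] fuel l cur acc = ((cur.reverse ++ l) :: acc).reverse := by
  induction l with
  | nil => intro fuel cur acc _; cases fuel <;> simp [PySem.Chars.splitOn.go]
  | cons x t ih =>
    intro fuel cur acc h
    cases fuel with
    | zero => simp [PySem.Chars.splitOn.go]
    | succ fuel =>
      have hx : c ≠ x := fun e => h (e ▸ List.mem_cons_self)
      have ht : c ∉ t := fun e => h (List.mem_cons_of_mem _ e)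
      simp only [PySem.Chars.splitOn.go]
      rw [if_neg (by simp [List.isPrefixOf, hx])]
      rw [ih fuel (x :: cur) acc ht]
      simp

theorem pvSplitOn_not_mem (c : Char) (l : List Char) (h : c ∉ l) :
    PySem.Chars.splitOn l [c] = [l] := by
  simp only [PySem.Chars.splitOn]
  rw [pvSplitOn_go_not_mem c l (l.length + 1) [] [] h]
  simp

theorem pvParseInts_length (parts : List (List Char)) (idx : List Int)
    (h : pvParseInts parts = some idx) : idx.length = parts.length := by
  induction parts generalizing idx with
  | nil => simp [pvParseInts] at h; simp [← h]
  | cons p ps ih =>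
    simp only [pvParseInts] at h
    cases hp : PySem.Int.ofChars? p <;> rw [hp] at h
    · simp at h
    · cases hr : pvParseInts ps <;> rw [hr] at h
      · simp at h
      · simp at h
        simp [← h, ih _ hr]

theorem pvScanLoop_none (groups : List Int) (n : Int) (parts : List (List Char))
    (h : pvParseInts parts = none) :
    ∀ seen res, pvScanLoop groups n parts seen res = none := by
  induction parts with
  | nil => simp [pvParseInts] at h
  | cons p ps ih =>
    intro seen res
    simp only [pvParseInts] at h
    simp only [pvScanLoop]
    cases hp : PySem.Int.ofChars? p with
    | none => rfl
    | some i =>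
      rw [hp] at h
      cases hr : pvParseInts ps with
      | none =>
        dsimp only
        split
        · rfl
        · exact ih hr _ _
      | some rest => rw [hr] at h; simp at h

theorem pvScanLoop_some (groups : List Int) (n : Int) (parts : List (List Char)) (idx : List Int)
    (h : pvParseInts parts = some idx) :
    ∀ seen res, pvScanLoop groups n parts seen res =
      if pvOk n idx seen then some (res ++ idx.map (fun i => PySem.List.pyGetD groups i 0)) else none := by
  induction parts generalizing idx with
  | nil =>
    intro seen res
    simp [pvParseInts] at h
    subst h
    simp [pvScanLoop, pvOk]
  | cons p ps ih =>
    intro seen res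
    simp only [pvParseInts] at h
    simp only [pvScanLoop]
    cases hp : PySem.Int.ofChars? p with
    | none => rw [hp] at h; simp at h
    | some i =>
      rw [hp] at h
      cases hr : pvParseInts ps with
      | none => rw [hr] at h; simp at h
      | some rest =>
        rw [hr] at h
        simp at h
        subst h
        dsimp only
        by_cases hbad : i < 0 ∨ n ≤ i ∨ PySem.List.pyGetD seen i false = true
        · rw [if_pos hbad, if_neg ?_]
          simp only [pvOk, Bool.and_eq_true, decide_eq_true_eq, Bool.not_eq_true']
          rcases hbad with hb | hb | hb
          · intro hc; omega
          · intro hc; omega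
          · intro hc; exact absurd hc.1.2 (by simp [hb])
        · push Not at hbad
          rw [if_neg (by simpa using hbad), ih rest hr]
          have hok : pvOk n (i :: rest) seen =
              pvOk n rest (PySem.List.pySetD seen i true) := by
            simp only [pvOk]
            simp [hbad.1, hbad.2.1, hbad.2.2]
          rw [hok]
          split
          · simp
          · rfl

theorem pvGetD_replicate (n : Nat) (j : Int) :
    PySem.List.pyGetD (List.replicate n false) j false = false := by
  simp only [PySem.List.pyGetD, PySem.List.pyGet?, PySem.List.pyIdx?, List.length_replicate]
  split_ifs <;> simp [List.getElem?_replicate] <;> split_ifs <;> rfl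

theorem pvGetD_pySetD (seen : List Bool) (i j : Int) (hi0 : 0 ≤ i) (_hi : i < seen.length)
    (hj0 : 0 ≤ j) (hj : j < seen.length) :
    PySem.List.pyGetD (PySem.List.pySetD seen i true) j false =
      if j = i then true else PySem.List.pyGetD seen j false := by
  rw [PySem.List.pySetD_of_nonneg seen true hi0]
  rw [PySem.List.pyGetD_eq_getElem _ false hj0 (by simpa using hj),
      List.getElem_set]
  by_cases hji : j = i
  · rw [if_pos hji, if_pos (by omega)]
  · rw [if_neg hji, if_neg (by omega),
        PySem.List.pyGetD_eq_getElem seen false hj0 hj]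

theorem pvOk_iff (n : Nat) (idx : List Int) :
    ∀ seen : List Bool, seen.length = n →
    (pvOk n idx seen = true ↔
      idx.Nodup ∧ ∀ i ∈ idx, 0 ≤ i ∧ i < (n : Int) ∧ PySem.List.pyGetD seen i false = false) := by
  induction idx with
  | nil => intro seen _; simp [pvOk]
  | cons i rest ih =>
    intro seen hlen
    simp only [pvOk, Bool.and_eq_true, decide_eq_true_eq, Bool.not_eq_true']
    by_cases h0 : 0 ≤ i
    · by_cases h1 : i < (n : Int)
      · by_cases h2 : PySem.List.pyGetD seen i false = false
        · have hrec := ih (PySem.List.pySetD seen i true)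
            (by rw [PySem.List.length_pySetD]; exact hlen)
          constructor
          · rintro ⟨⟨⟨-, -⟩, -⟩, hok⟩
            obtain ⟨hnd, hall⟩ := hrec.mp hok
            have hnotin : i ∉ rest := by
              intro hin
              have := (hall i hin).2.2
              rw [pvGetD_pySetD seen i i h0 (by omega) h0 (by omega)] at this
              simp at this
            refine ⟨List.nodup_cons.mpr ⟨hnotin, hnd⟩, ?_⟩
            intro j hj
            rcases List.mem_cons.mp hj with hji | hjr
            · exact hji ▸ ⟨h0, h1, h2⟩
            · obtain ⟨hj0, hj1, hjs⟩ := hall j hjr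
              rw [pvGetD_pySetD seen i j h0 (by omega) hj0 (by omega)] at hjs
              refine ⟨hj0, hj1, ?_⟩
              by_cases hje : j = i
              · rw [if_pos hje] at hjs; simp at hjs
              · rwa [if_neg hje] at hjs
          · rintro ⟨hnd, hall⟩
            obtain ⟨hnotin, hndr⟩ := List.nodup_cons.mp hnd
            refine ⟨⟨⟨h0, h1⟩, h2⟩, hrec.mpr ⟨hndr, ?_⟩⟩
            intro j hjr
            obtain ⟨hj0, hj1, hjs⟩ := hall j (List.mem_cons_of_mem _ hjr)
            refine ⟨hj0, hj1, ?_⟩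
            rw [pvGetD_pySetD seen i j h0 (by omega) hj0 (by omega),
                if_neg (by rintro rfl; exact hnotin hjr)]
            exact hjs
        · constructor
          · rintro ⟨⟨⟨-, -⟩, hc⟩, -⟩; exact absurd hc h2
          · rintro ⟨-, hall⟩
            exact absurd (hall i (List.mem_cons_self)).2.2 h2
      · constructor
        · rintro ⟨⟨⟨-, hc⟩, -⟩, -⟩; exact absurd hc h1
        · rintro ⟨-, hall⟩
          exact absurd (hall i (List.mem_cons_self)).2.1 h1
    · constructor
      · rintro ⟨⟨⟨hc, -⟩, -⟩, -⟩; exact absurd hc h0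
      · rintro ⟨-, hall⟩
        exact absurd (hall i (List.mem_cons_self)).1 h0

theorem pvSorted_iff (idx : List Int) (n : Nat) (hlen : idx.length = n) :
    (PySem.List.sorted idx id = PySem.List.pyRange 0 (n : Int) 1 ↔
      idx.Nodup ∧ ∀ i ∈ idx, 0 ≤ i ∧ i < (n : Int)) := by
  constructor
  · intro hs
    have hperm : idx.Perm (PySem.List.pyRange 0 (n : Int) 1) := by
      have h1 := PySem.List.sorted_perm idx id false
      rw [hs] at h1
      exact h1.symm
    refine ⟨hperm.nodup_iff.mpr (PySem.List.nodup_pyRange_one 0 (n : Int)), ?_⟩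
    intro i hi
    have := PySem.List.mem_pyRange_one.mp (hperm.mem_iff.mp hi)
    exact ⟨this.1, this.2⟩
  · rintro ⟨hnd, hb⟩
    have hsub : idx ⊆ PySem.List.pyRange 0 (n : Int) 1 := fun x hx =>
      PySem.List.mem_pyRange_one.mpr ⟨(hb x hx).1, (hb x hx).2⟩
    have hperm := (hnd.subperm hsub).perm_of_length_le
      (by rw [PySem.List.length_pyRange_one]; omega)
    exact PySem.List.sorted_eq_of_perm_of_pairwise_lt idx _ id hperm.symm
      (PySem.List.pairwise_lt_pyRange_one 0 (n : Int))

theorem pvTail_eq (groups : List Int) (parts : List (List Char)) :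
    (match pvParseInts parts with
     | none => none
     | some indices =>
       if (indices.length : Int) ≠ (groups.length : Int) then none
       else if PySem.List.sorted indices id ≠ PySem.List.pyRange 0 (groups.length : Int) 1 then none
       else some (indices.map (fun i => PySem.List.pyGetD groups i 0)))
    = (if (parts.length : Int) ≠ (groups.length : Int) then none
       else pvScanLoop groups (groups.length : Int) parts (List.replicate groups.length false) []) := by
  cases h : pvParseInts parts with
  | none =>
    dsimp only
    by_cases hne : (parts.length : Int) = (groups.length : Int)
    · rw [if_neg (by omega)]
      exact (pvScanLoop_none groups _ parts h _ _).symm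
    · rw [if_pos (by omega)]
  | some idx =>
    dsimp only
    have hlen := pvParseInts_length parts idx h
    by_cases hne : (parts.length : Int) = (groups.length : Int)
    · have h1 : ¬((idx.length : Int) ≠ (groups.length : Int)) := by omega
      have h2 : ¬((parts.length : Int) ≠ (groups.length : Int)) := by omega
      rw [if_neg h1, if_neg h2, pvScanLoop_some groups _ parts idx h]
      have hok := pvOk_iff groups.length idx (List.replicate groups.length false) (by simp)
      have hsort := pvSorted_iff idx groups.length (by omega)
      simp only [pvGetD_replicate, and_true] at hok
      by_cases hs : PySem.List.sorted idx id = PySem.List.pyRange 0 (groups.length : Int) 1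
      · rw [if_neg (not_not_intro hs), if_pos (hok.mpr (hsort.mp hs)), List.nil_append]
      · rw [if_pos hs, if_neg (show ¬(pvOk (groups.length : Int) idx (List.replicate groups.length false) = true) by
          rw [hok, ← hsort]; exact hs)]
    · rw [if_pos (by omega), if_pos (by omega)]

-- A's three-way parts selection collapses to B's unconditional replace+split
theorem pvParts_eq (cleaned : List Char) (hne : cleaned ≠ []) :
    (if PySem.Chars.isIn [','] cleaned then
       (PySem.Chars.splitOn (PySem.Chars.replace cleaned [','] [' ']) [' ']).filter (fun p => !p.isEmpty)
     else if PySem.Chars.isIn [' '] cleaned then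
       (PySem.Chars.splitOn (PySem.Chars.replace cleaned [','] [' ']) [' ']).filter (fun p => !p.isEmpty)
     else [cleaned])
    = (PySem.Chars.splitOn (PySem.Chars.replace cleaned [','] [' ']) [' ']).filter (fun p => !p.isEmpty) := by
  split_ifs with h1 h2
  · rfl
  · rfl
  · have hc : ',' ∉ cleaned := fun hm =>
      h1 ((PySem.Chars.isIn_iff_infix _ _).mpr ((List.singleton_infix_iff _ _).mpr hm))
    have hs : ' ' ∉ cleaned := fun hm =>
      h2 ((PySem.Chars.isIn_iff_infix _ _).mpr ((List.singleton_infix_iff _ _).mpr hm))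
    rw [pvReplace_not_mem ',' [' '] cleaned hc, pvSplitOn_not_mem ' ' cleaned hs]
    simp [hne]

theorem pvOrder_eq (cleaned : List Char) (groups : List Int) :
    pvOrderA cleaned groups =
      (if cleaned = [] then none
       else
         let parts := (PySem.Chars.splitOn (PySem.Chars.replace cleaned [','] [' ']) [' ']).filter (fun p => !p.isEmpty)
         if (parts.length : Int) ≠ (groups.length : Int) then none
         else pvScanLoop groups (groups.length : Int) parts (List.replicate groups.length false) []) := by
  unfold pvOrderA
  by_cases hne : cleaned = []
  · rw [if_pos hne, if_pos hne]
  · rw [if_neg hne, if_neg hne]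
    dsimp only
    rw [pvParts_eq _ hne]
    exact pvTail_eq groups _

-- ===== VERDICT (by name: the statement is the Claim_ definition above) =====
theorem parse_ordering_py_spec : Claim_equal_parse_ordering_py := by
  intro raw groups _
  unfold Spec_parse_ordering_py parse_ordering_py parse_ordering_py_alt
  exact pvOrder_eq _ _
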